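-- pv_equiv track=rewrite | github.com/Alk2017/tasks | python/ozon/print_rest_page.py | sc_by_p
-- ===== SOURCE A (Python) =====
-- def sc_by_p(sbc):
--     res = dict()
--     su = list(sbc.keys())
--     su.sort()
--     pl = 1
--     d = 0
--     for i, s in enumerate(su):
--         if i != 0 and (s - su[i - 1]) > 1:
--             pl += d
--             d = sbc[s]
--         else:
--             d += sbc[s]
--         res[s] = pl
--     return res
-- ===== SOURCE B (Python) =====
-- def sc_by_p(sbc):
--     # Phase 1: partition the sorted keys into runs of consecutive integers.
--     keys = sorted(sbc)
--     groups = []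
--     if keys:
--         cur = [keys[0]]
--         for s in keys[1:]:
--             if s - cur[-1] == 1:
--                 cur.append(s)
--             else:
--                 groups.append(cur)
--                 cur = [s]
--         groups.append(cur)
--     # Phase 2: cumulative pass over the runs with a running page counter.
--     res = {}
--     page = 1
--     for g in groups:
--         for s in g:
--             res[s] = page
--         page += sum(sbc[s] for s in g)
--     return res
-- ===== Notes on version B (the rewrite author's own statement) =====
-- stated objective: alternative
-- what changed: Replaces A's single fused loop (running page, gap test and value accumulator per key) with a two-phase decomposition: first partition the sorted keys into explicit runs of consecutive integers, then a cumulative pass over the runs assigning the running page to every key of a run and advancing it by the run's value sum.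
import Mathlib
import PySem

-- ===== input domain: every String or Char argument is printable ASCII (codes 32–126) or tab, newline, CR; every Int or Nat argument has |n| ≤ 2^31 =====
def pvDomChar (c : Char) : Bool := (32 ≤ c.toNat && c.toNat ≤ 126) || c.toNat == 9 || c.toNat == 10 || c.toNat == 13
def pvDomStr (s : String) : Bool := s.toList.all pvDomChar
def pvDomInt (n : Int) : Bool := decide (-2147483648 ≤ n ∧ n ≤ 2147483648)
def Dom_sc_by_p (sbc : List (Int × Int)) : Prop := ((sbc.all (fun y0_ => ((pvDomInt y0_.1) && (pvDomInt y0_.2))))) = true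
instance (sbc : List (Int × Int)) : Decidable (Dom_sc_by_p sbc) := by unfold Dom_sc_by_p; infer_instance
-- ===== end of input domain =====

-- B replaces A's fused page/gap accumulator loop by a two-phase decomposition
-- (partition sorted keys into consecutive runs, then one cumulative pass over
-- the runs); objective: alternative structure, same cost.

-- dict lookup sbc[s] (first match; exact for a Python dict, whose keys are distinct);
-- shared by both ports, it is just the dict access both Pythons write as sbc[s]
def sc_by_p_lookup (sbc : List (Int × Int)) (k : Int) : Int :=
  (sbc.lookup k).getD 0

-- ===== PORT A =====
-- A's loop: state (res, pl, d); prev = None encodes i == 0 (the 'i != 0 and …' test)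
def sc_by_p_go (sbc : List (Int × Int)) (res : List (Int × Int)) (prev : Option Int)
    (pl d : Int) : List Int → List (Int × Int)
  | [] => res
  | s :: rest =>
    match prev with
    | some p =>
      if s - p > 1 then
        sc_by_p_go sbc (res ++ [(s, pl + d)]) (some s) (pl + d) (sc_by_p_lookup sbc s) rest
      else
        sc_by_p_go sbc (res ++ [(s, pl)]) (some s) pl (d + sc_by_p_lookup sbc s) rest
    | none =>
      sc_by_p_go sbc (res ++ [(s, pl)]) (some s) pl (d + sc_by_p_lookup sbc s) rest

def sc_by_p (sbc : List (Int × Int)) : List (Int × Int) :=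
  -- su = sorted(sbc.keys()); res built by res[s] = pl (fresh keys append in order)
  sc_by_p_go sbc [] none 1 0 (PySem.List.sorted (sbc.map Prod.fst) (fun x => x) false)

-- ===== PORT B =====
-- phase 1 of Source B: split the sorted keys into runs of consecutive integers
-- (cur is never empty, so cur.getLastD 0 is Source B's cur[-1])
def sc_by_p_alt_groups (cur : List Int) : List Int → List (List Int)
  | [] => [cur]
  | s :: rest =>
    if s - cur.getLastD 0 = 1 then sc_by_p_alt_groups (cur ++ [s]) rest
    else cur :: sc_by_p_alt_groups [s] rest

-- phase 2 of Source B: assign the running page to every key of a run, then advance it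
def sc_by_p_alt_pages (sbc : List (Int × Int)) (page : Int) : List (List Int) → List (Int × Int)
  | [] => []
  | g :: gs =>
    (g.map (fun s => (s, page))) ++
      sc_by_p_alt_pages sbc (page + (g.map (sc_by_p_lookup sbc)).sum) gs

def sc_by_p_alt (sbc : List (Int × Int)) : List (Int × Int) :=
  match PySem.List.sorted (sbc.map Prod.fst) (fun x => x) false with
  | [] => []
  | s :: rest => sc_by_p_alt_pages sbc 1 (sc_by_p_alt_groups [s] rest)

-- ===== PRECONDITION & SPEC =====
-- Python callers pass a dict, whose keys are necessarily distinct; an association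
-- list with a repeated key encodes no Python dict input, so Pre_ excludes only
-- those representation artefacts (A returns on every actual dict).
def Pre_sc_by_p (sbc : List (Int × Int)) : Prop := (sbc.map Prod.fst).Nodup
instance (sbc : List (Int × Int)) : Decidable (Pre_sc_by_p sbc) := by
  unfold Pre_sc_by_p; infer_instance

def pvWitness_sc_by_p : (List (Int × Int)) := [(1, 5), (2, 3), (10, 7)]

def Spec_sc_by_p (sbc : List (Int × Int)) (out : List (Int × Int)) : Prop := out = sc_by_p_alt sbc
instance (sbc : List (Int × Int)) (out : List (Int × Int)) : Decidable (Spec_sc_by_p sbc out) := by unfold Spec_sc_by_p; infer_instance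

-- ===== CLAIM (what is proved, stated in full; the proofs are below) =====
def Claim_equal_sc_by_p : Prop := ∀ (sbc : List (Int × Int)), Dom_sc_by_p sbc → Pre_sc_by_p sbc → Spec_sc_by_p sbc (sc_by_p sbc)

-- ===== LEMMAS AND PROOFS =====

-- emit-form of A's loop body (the part appended after res)
def sc_by_p_emit (sbc : List (Int × Int)) (prev pl d : Int) : List Int → List (Int × Int)
  | [] => []
  | s :: rest =>
    if s - prev > 1 then
      (s, pl + d) :: sc_by_p_emit sbc s (pl + d) (sc_by_p_lookup sbc s) rest
    else
      (s, pl) :: sc_by_p_emit sbc s pl (d + sc_by_p_lookup sbc s) rest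

theorem sc_by_p_go_eq_emit (sbc : List (Int × Int)) (rest : List Int) :
    ∀ res prev pl d, sc_by_p_go sbc res (some prev) pl d rest
      = res ++ sc_by_p_emit sbc prev pl d rest := by
  induction rest with
  | nil => intro res prev pl d; simp [sc_by_p_go, sc_by_p_emit]
  | cons s rest ih =>
    intro res prev pl d
    simp only [sc_by_p_go, sc_by_p_emit]
    split_ifs with h <;> simp [ih, List.append_assoc]

theorem sc_by_p_pages_groups_eq (sbc : List (Int × Int)) (rest : List Int) :
    ∀ cur page, cur ≠ [] →
      List.Pairwise (· < ·) (cur.getLastD 0 :: rest) →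
      sc_by_p_alt_pages sbc page (sc_by_p_alt_groups cur rest)
        = cur.map (fun s => (s, page)) ++
            sc_by_p_emit sbc (cur.getLastD 0) page ((cur.map (sc_by_p_lookup sbc)).sum) rest := by
  induction rest with
  | nil =>
    intro cur page _ _
    simp [sc_by_p_alt_groups, sc_by_p_alt_pages, sc_by_p_emit]
  | cons s rest ih =>
    intro cur page hcur hch
    obtain ⟨hall, hch⟩ := List.pairwise_cons.mp hch
    have hlt : cur.getLastD 0 < s := hall s (by simp)
    simp only [sc_by_p_alt_groups, sc_by_p_emit]
    by_cases h1 : s - cur.getLastD 0 = 1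
    · rw [if_pos h1]
      have hne : (cur ++ [s]) ≠ [] := by simp
      have hlast : (cur ++ [s]).getLastD 0 = s := by
        simp [List.getLastD_eq_getLast?]
      rw [ih (cur ++ [s]) page hne (by rw [hlast]; exact hch)]
      rw [if_neg (by omega)]
      simp [List.append_assoc]
    · rw [if_neg h1]
      have hgt : s - cur.getLastD 0 > 1 := by omega
      rw [if_pos hgt]
      simp only [sc_by_p_alt_pages]
      rw [ih [s] (page + (cur.map (sc_by_p_lookup sbc)).sum) (by simp)
            (by simpa using hch)]
      simp

theorem sc_by_p_sorted_chain (sbc : List (Int × Int)) (s : Int) (rest : List Int)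
    (hpre : Pre_sc_by_p sbc)
    (h : PySem.List.sorted (sbc.map Prod.fst) (fun x => x) false = s :: rest) :
    List.Pairwise (· < ·) (s :: rest) := by
  have hperm := PySem.List.sorted_perm (sbc.map Prod.fst) (fun x => x) false
  have hnd : (PySem.List.sorted (sbc.map Prod.fst) (fun x => x) false).Nodup :=
    hperm.nodup_iff.mpr hpre
  have hle := PySem.List.sorted_pairwise (sbc.map Prod.fst) (fun x => x)
  rw [h] at hnd hle
  exact (hle.and hnd).imp (fun hab => lt_of_le_of_ne hab.1 hab.2)

-- ===== VERDICT (by name: the statement is the Claim_ definition above) =====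
theorem sc_by_p_spec : Claim_equal_sc_by_p := by
  intro sbc _ hpre
  unfold Spec_sc_by_p sc_by_p sc_by_p_alt
  cases h : PySem.List.sorted (sbc.map Prod.fst) (fun x => x) false with
  | nil => simp [sc_by_p_go]
  | cons s rest =>
    have hch := sc_by_p_sorted_chain sbc s rest hpre h
    simp only [sc_by_p_go]
    rw [sc_by_p_go_eq_emit,
        sc_by_p_pages_groups_eq sbc rest [s] 1 (by simp) (by simpa using hch)]
    simp
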